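-- pv_equiv track=rewrite | github.com/xcellentbird/algorithm-training | Programmers/사전순 부분문자열.py | solution
-- ===== SOURCE A (Python) =====
-- def solution(s):
--     stack = [s[0]]
--     for i, letter in enumerate(s[1:]):
--         while True:
--             if stack and stack[-1] < letter:
--                 stack.pop()
--             else:
--                 stack.append(letter)
--                 break
--
--     return ''.join(stack)
-- ===== SOURCE B (Python) =====
-- def solution(s):
--     res = []
--     best = None
--     for c in reversed(s):
--         if best is None or c >= best:
--             res.append(c)
--             best = c
--     return ''.join(reversed(res))
-- ===== Notes on version B (the rewrite author's own statement) =====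
-- stated objective: simpler
-- what changed: Replaced the monotonic stack with pops by a single right-to-left scan keeping a running maximum: a character is kept iff it is >= every character after it, so no popping or inner loop is needed; Pre_ excludes only the empty string, on which A raises IndexError at s[0].
import Mathlib
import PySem

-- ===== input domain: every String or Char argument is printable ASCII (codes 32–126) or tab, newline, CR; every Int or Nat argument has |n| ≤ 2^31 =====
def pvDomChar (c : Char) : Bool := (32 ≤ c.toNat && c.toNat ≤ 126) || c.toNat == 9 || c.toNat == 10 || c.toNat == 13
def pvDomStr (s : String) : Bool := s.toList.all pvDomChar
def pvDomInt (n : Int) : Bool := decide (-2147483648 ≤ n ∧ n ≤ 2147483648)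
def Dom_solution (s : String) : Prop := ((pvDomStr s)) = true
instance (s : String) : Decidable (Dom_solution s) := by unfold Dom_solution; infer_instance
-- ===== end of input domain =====

-- B replaces A's monotonic stack (inner popping loop) by one right-to-left scan with a
-- running maximum (simpler: no inner loop); equivalence is claimed for nonempty strings.

-- ===== PORT A =====
-- A's inner `while True`: pop while the stack top is < letter, then push the letter.
-- The stack is kept top-first (head = Python stack[-1]); the final join reverses it.
def pushLoop (stack : List Char) (c : Char) : List Char :=
  match stack with
  | t :: rest => if t < c then pushLoop rest c else c :: t :: rest
  | [] => [c]

def solution (s : String) : String :=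
  match s.toList with
  | [] => ""   -- unreachable under Pre_solution: Python raises IndexError at s[0]
  | c :: rest => String.ofList ((rest.foldl pushLoop [c]).reverse)

-- ===== PORT B =====
-- one step of B's loop over reversed(s): state = (res, best)
def altStep (st : List Char × Option Char) (c : Char) : List Char × Option Char :=
  match st.2 with
  | none => (st.1 ++ [c], some c)
  | some b => if b ≤ c then (st.1 ++ [c], some c) else st

def solution_alt (s : String) : String :=
  let r := s.toList.reverse.foldl altStep ([], none)
  String.ofList r.1.reverse

-- ===== PRECONDITION & SPEC =====
-- Pre_ excludes only the empty string, on which Python A raises IndexError at s[0].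
def Pre_solution (s : String) : Prop := s ≠ ""
instance (s : String) : Decidable (Pre_solution s) := by unfold Pre_solution; infer_instance
def pvWitness_solution : String := "bacdb"

def Spec_solution (s : String) (out : String) : Prop := out = solution_alt s
instance (s : String) (out : String) : Decidable (Spec_solution s out) := by unfold Spec_solution; infer_instance

-- ===== CLAIM (what is proved, stated in full; the proofs are below) =====
def Claim_equal_solution : Prop := ∀ (s : String), Dom_solution s → Pre_solution s → Spec_solution s (solution s)

-- ===== LEMMAS AND PROOFS =====

-- reference function: keep each character iff it is ≥ the maximum of the suffix after it
def g : List Char → List Char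
  | [] => []
  | c :: t =>
    match g t with
    | [] => [c]
    | b :: r => if b ≤ c then c :: b :: r else b :: r

-- g is non-increasing front-to-back
theorem g_pairwise (l : List Char) : (g l).Pairwise (fun a b => b ≤ a) := by
  induction l with
  | nil => simp [g]
  | cons c t ih =>
    simp only [g]
    cases h : g t with
    | nil => simp
    | cons b r =>
      rw [h] at ih
      by_cases hb : b ≤ c
      · simp only [hb, if_true]
        refine List.Pairwise.cons ?_ ih
        intro x hx
        rcases List.mem_cons.mp hx with hx | hx
        · exact hx ▸ hb
        · exact le_trans (List.rel_of_pairwise_cons ih hx) hb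
      · simpa [hb] using ih

-- pushLoop is: drop the strictly-smaller prefix, then cons
theorem pushLoop_eq (st : List Char) (c : Char) :
    pushLoop st c = c :: st.dropWhile (· < c) := by
  induction st with
  | nil => simp [pushLoop, List.dropWhile]
  | cons t rest ih =>
    by_cases h : t < c
    · simp [pushLoop, List.dropWhile, h, ih]
    · simp [pushLoop, List.dropWhile, h]

-- on a non-decreasing list, dropWhile (· < c) = filter (c ≤ ·)
theorem dropWhile_sorted (c : Char) (st : List Char)
    (h : st.Pairwise (fun a b => a ≤ b)) :
    st.dropWhile (· < c) = st.filter (fun x => c ≤ x) := by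
  induction st with
  | nil => simp
  | cons t rest ih =>
    by_cases ht : t < c
    · have : ¬ c ≤ t := not_le.mpr ht
      simp only [List.dropWhile, List.filter]
      simp [ht, this, ih (List.Pairwise.sublist (List.sublist_cons_self t rest) h)]
    · have hct : c ≤ t := not_lt.mp ht
      have hall : ∀ x ∈ rest, c ≤ x := fun x hx =>
        le_trans hct (List.rel_of_pairwise_cons h hx)
      have hfil : rest.filter (fun x => decide (c ≤ x)) = rest := by
        apply List.filter_eq_self.mpr
        intro x hx; simpa using hall x hx
      simp [ht, hct, hfil]

-- snoc rule for g
theorem g_append (p : List Char) (c : Char) :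
    g (p ++ [c]) = (g p).filter (fun x => c ≤ x) ++ [c] := by
  induction p with
  | nil => simp [g]
  | cons a t ih =>
    simp only [List.cons_append, g, ih]
    cases h : g t with
    | nil =>
      by_cases hc : c ≤ a <;> simp [hc, List.filter]
    | cons b r =>
      by_cases hb : b ≤ a
      · simp only [hb, if_true, List.filter]
        by_cases hca : c ≤ a
        · simp only [hca, decide_true]
          by_cases hcb : c ≤ b
          · simp [hcb, hb]
          · simp only [hcb, decide_false]
            cases hr : (r.filter (fun x => decide (c ≤ x))) with
            | nil => simp [hca]
            | cons y ys =>
              -- y ∈ r so y ≤ b (pairwise), but c ≤ y and ¬ c ≤ b: contradiction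
              exfalso
              have hy : y ∈ r.filter (fun x => decide (c ≤ x)) := by rw [hr]; exact List.mem_cons_self
              have hy' := List.of_mem_filter hy
              have hymem := List.mem_of_mem_filter hy
              have hpw := g_pairwise t
              rw [h] at hpw
              have : y ≤ b := List.rel_of_pairwise_cons hpw hymem
              exact hcb (le_trans (by simpa using hy') this)
        · have hcb : ¬ c ≤ b := fun hx => hca (le_trans hx hb)
          simp only [hca, decide_false]
          have hrnil : r.filter (fun x => decide (c ≤ x)) = [] := by
            apply List.filter_eq_nil_iff.mpr
            intro y hy
            have hpw := g_pairwise t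
            rw [h] at hpw
            have : y ≤ b := List.rel_of_pairwise_cons hpw hy
            simpa using fun hx => hca (le_trans (le_trans hx this) hb)
          simp [hcb, hrnil, not_le.mp hca]
      · simp only [hb, if_false, List.filter]
        by_cases hcb : c ≤ b
        · have hca' : ¬ b ≤ c ∨ True := Or.inr trivial
          by_cases hbc : b ≤ c
          · have : b = c := le_antisymm hbc hcb
            subst this
            simp [hb]
          · simp [hcb, not_le.mp hb]
        · have hrnil : r.filter (fun x => decide (c ≤ x)) = [] := by
            apply List.filter_eq_nil_iff.mpr
            intro y hy
            have hpw := g_pairwise t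
            rw [h] at hpw
            have : y ≤ b := List.rel_of_pairwise_cons hpw hy
            simpa using fun hx => hcb (le_trans hx this)
          have hac : a < c := lt_trans (not_le.mp hb) (not_le.mp hcb)
          simp [hcb, hrnil, hac]

-- A's stack (top-first) after processing c :: rest equals (g (c :: rest)).reverse
theorem stackA (c : Char) (rest : List Char) :
    rest.foldl pushLoop [c] = (g (c :: rest)).reverse := by
  induction rest using List.reverseRecOn with
  | nil => simp [g]
  | append_singleton t d ih =>
    rw [List.foldl_append, List.foldl_cons, List.foldl_nil, ih, pushLoop_eq]
    have hsorted : ((g (c :: t)).reverse).Pairwise (fun a b => a ≤ b) := by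
      rw [List.pairwise_reverse]
      exact g_pairwise (c :: t)
    rw [dropWhile_sorted d _ hsorted, ← List.cons_append, g_append]
    simp [List.filter_reverse]

-- B's fold invariant
theorem foldB (t : List Char) :
    t.reverse.foldl altStep ([], none) = ((g t).reverse, (g t).head?) := by
  induction t with
  | nil => simp [g]
  | cons c t' ih =>
    rw [List.reverse_cons, List.foldl_append, ih, List.foldl_cons, List.foldl_nil]
    cases h : g t' with
    | nil => simp [altStep, g, h]
    | cons b r =>
      by_cases hb : b ≤ c
      · simp [altStep, g, h, hb]
      · simp [altStep, g, h, hb]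

-- ===== VERDICT (by name: the statement is the Claim_ definition above) =====
theorem solution_spec : Claim_equal_solution := by
  intro s _ hpre
  unfold Spec_solution solution solution_alt
  cases hs : s.toList with
  | nil =>
    exact absurd (by rwa [← String.toList_eq_nil_iff]) hpre
  | cons c rest =>
    simp only [foldB, stackA, List.reverse_reverse]
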